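-- pv_equiv track=rewrite | github.com/Neutron02/GNN_STA | scripts/train_tripath_dualpass.py | _pin_name_aliases
-- ===== SOURCE A (Python) =====
-- from typing import Dict, Iterable, List, Optional, Sequence, Tuple
--
-- def _pin_name_aliases(name: str) -> List[str]:
--     s = str(name).strip()
--     if not s:
--         return []
--
--     # Normalize escaped pin/index text from CSV exports (e.g. "\[" -> "[").
--     s = s.replace("\\[", "[").replace("\\]", "]").replace("\\", "")
--     out = [s]
--
--     # Add hierarchy-stripped aliases to match path reports that may omit top module names.
--     if "." in s:
--         parts = s.split(".")
--         for i in range(1, len(parts)):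
--             out.append(".".join(parts[i:]))
--     out.append(s.split(".")[-1])
--
--     uniq: List[str] = []
--     seen = set()
--     for v in out:
--         vv = v.strip()
--         if not vv or vv in seen:
--             continue
--         seen.add(vv)
--         uniq.append(vv)
--     return uniq
-- ===== SOURCE B (Python) =====
-- from typing import List
--
-- def _pin_name_aliases(name: str) -> List[str]:
--     # Normalize first (strip + un-escape), then emit the dot-suffixes by index
--     # scan with find(), deduplicating online as each alias is produced.
--     s = str(name).strip()
--     s = s.replace("\\[", "[").replace("\\]", "]").replace("\\", "")
--     if not s:
--         return []
--     uniq: List[str] = []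
--     seen = set()
--     rest = s
--     while True:
--         v = rest.strip()
--         if v and v not in seen:
--             seen.add(v)
--             uniq.append(v)
--         idx = rest.find(".")
--         if idx < 0:
--             return uniq
--         rest = rest[idx + 1:]
-- ===== Notes on version B (the rewrite author's own statement) =====
-- stated objective: alternative
-- what changed: Instead of splitting on '.' into a parts list, re-joining every tail with '.'.join and then running a second dedup pass (plus a redundant last-component append), B scans the normalized string once with find('.'), emitting each dot-suffix slice directly and deduplicating online in the same loop.
import Mathlib
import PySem

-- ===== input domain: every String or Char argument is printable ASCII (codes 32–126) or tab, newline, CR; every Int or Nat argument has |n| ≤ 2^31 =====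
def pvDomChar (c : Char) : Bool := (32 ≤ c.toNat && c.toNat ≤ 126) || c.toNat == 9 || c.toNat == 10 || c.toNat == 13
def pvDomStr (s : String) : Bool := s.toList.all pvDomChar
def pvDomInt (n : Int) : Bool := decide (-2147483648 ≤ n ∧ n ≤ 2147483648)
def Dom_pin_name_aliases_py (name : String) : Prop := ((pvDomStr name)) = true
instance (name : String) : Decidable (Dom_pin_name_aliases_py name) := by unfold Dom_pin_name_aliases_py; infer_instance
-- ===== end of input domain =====

-- B replaces A's split-into-parts + '.'.join-of-tails + second dedup pass by a single find('.')-driven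
-- suffix scan with online dedup (objective: alternative decomposition, no speed claim).

-- ===== PORT A =====
-- the dedup loop body of A ("vv = v.strip(); if not vv or vv in seen: continue; …")
def pvDedupStepA (acc : List (List Char) × PySem.Set (List Char)) (v : List Char) :
    List (List Char) × PySem.Set (List Char) :=
  let vv := PySem.Chars.strip v
  if vv = [] ∨ acc.2.contains vv = true then acc
  else (acc.1 ++ [vv], acc.2.add vv)

def pinAliasesCharsA (name : List Char) : List (List Char) :=
  let s := PySem.Chars.strip name
  if s = [] then []
  else
    let s := PySem.Chars.replace (PySem.Chars.replace (PySem.Chars.replace s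
               ['\\', '['] ['[']) ['\\', ']'] [']']) ['\\'] []
    let out := [s]
    let out :=
      if PySem.Chars.isIn ['.'] s = true then
        let parts := PySem.Chars.splitOn s ['.']
        (PySem.List.pyRange 1 (parts.length : Int) 1).foldl
          (fun o i => o ++ [PySem.Chars.join ['.'] (PySem.List.slice parts (some i) none)]) out
      else out
    -- s.split(".") is never the empty list, so Python's [-1] index never raises; getD is unreachable
    let out := out ++ [(PySem.List.pyGet? (PySem.Chars.splitOn s ['.']) (-1)).getD []]
    (out.foldl pvDedupStepA ([], PySem.Set.empty)).1

def pin_name_aliases_py (name : String) : List String :=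
  (pinAliasesCharsA name.toList).map String.ofList

-- ===== PORT B =====
-- B's while loop: add the stripped rest (if new and nonempty), then jump past the first '.'
def pvAliasScan (rest : List Char) (acc : List (List Char) × PySem.Set (List Char)) :
    List (List Char) :=
  let vv := PySem.Chars.strip rest
  let acc := if vv = [] ∨ acc.2.contains vv = true then acc else (acc.1 ++ [vv], acc.2.add vv)
  let idx := PySem.Chars.find rest ['.']
  if h : idx < 0 then acc.1
  else pvAliasScan (rest.drop (idx.toNat + 1)) acc
termination_by rest.length
decreasing_by
  have h0 : (0 : Int) ≤ PySem.Chars.find rest ['.'] := by omega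
  have hne : rest ≠ [] := by
    intro hr; rw [hr] at h0; revert h0; decide
  simp only [List.length_drop]
  have := List.length_pos_iff.mpr hne
  omega

def pin_name_aliases_py_alt (name : String) : List String :=
  let s := PySem.Chars.strip name.toList
  let s := PySem.Chars.replace (PySem.Chars.replace (PySem.Chars.replace s
             ['\\', '['] ['[']) ['\\', ']'] [']']) ['\\'] []
  if s = [] then []
  else (pvAliasScan s ([], PySem.Set.empty)).map String.ofList

-- ===== PRECONDITION & SPEC =====
def Spec_pin_name_aliases_py (name : String) (out : List String) : Prop := out = pin_name_aliases_py_alt name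
instance (name : String) (out : List String) : Decidable (Spec_pin_name_aliases_py name out) := by unfold Spec_pin_name_aliases_py; infer_instance

-- ===== CLAIM (what is proved, stated in full; the proofs are below) =====
def Claim_equal_pin_name_aliases_py : Prop := ∀ (name : String), Dom_pin_name_aliases_py name → Spec_pin_name_aliases_py name (pin_name_aliases_py name)

-- ===== LEMMAS AND PROOFS =====

-- the list of dot-suffixes B visits (s itself, then the remainder after each first '.')
def pvSufs (s : List Char) : List (List Char) :=
  let idx := PySem.Chars.find s ['.']
  if h : idx < 0 then [s]
  else s :: pvSufs (s.drop (idx.toNat + 1))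
termination_by s.length
decreasing_by
  have h0 : (0 : Int) ≤ PySem.Chars.find s ['.'] := by omega
  have hne : s ≠ [] := by
    intro hr; rw [hr] at h0; revert h0; decide
  simp only [List.length_drop]
  have := List.length_pos_iff.mpr hne
  omega

theorem splitOn_go_spec (d : Char) :
    ∀ (fuel : Nat) (l cur : List Char) (acc : List (List Char)), l.length < fuel →
      PySem.Chars.splitOn.go [d] fuel l cur acc =
        acc.reverse ++ (l.splitOn d).modifyHead (cur.reverse ++ ·) := by
  intro fuel
  induction fuel with
  | zero => intro l cur acc h; omega
  | succ f ih =>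
    intro l cur acc h
    cases l with
    | nil =>
      simp [PySem.Chars.splitOn.go, List.splitOn]
    | cons c rest =>
      by_cases hc : c = d
      · subst hc
        have hpre : [c].isPrefixOf (c :: rest) = true := by simp [List.isPrefixOf]
        rw [PySem.Chars.splitOn.go]
        simp only [hpre, if_true, List.length_cons, List.length_nil, List.drop_succ_cons,
          List.drop_zero]
        rw [ih rest [] (cur.reverse :: acc) (by simpa using Nat.lt_of_succ_lt_succ h)]
        simp only [List.splitOn, List.splitOnP_cons, beq_self_eq_true, if_true, List.reverse_cons,
          List.reverse_nil, List.nil_append, List.modifyHead_cons, List.append_assoc,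
          List.cons_append]
        cases List.splitOnP (fun x => x == c) rest <;> simp
      · have hpre : [d].isPrefixOf (c :: rest) = false := by
          simp [List.isPrefixOf]; exact fun hh => (hc hh.symm).elim
        rw [PySem.Chars.splitOn.go]
        simp only [hpre]
        rw [ih rest (c :: cur) acc (by simpa using h)]
        have hsp : (c :: rest).splitOn d = (rest.splitOn d).modifyHead (c :: ·) := by
          simp [List.splitOn, List.splitOnP_cons, hc]
        rw [hsp]
        cases hps : rest.splitOn d with
        | nil => exact absurd hps (by simp [List.splitOn]; exact List.splitOnP_ne_nil _ rest)
        | cons p ps => simp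

theorem splitOn_single (l : List Char) (d : Char) :
    PySem.Chars.splitOn l [d] = l.splitOn d := by
  unfold PySem.Chars.splitOn
  rw [splitOn_go_spec d (l.length + 1) l [] [] (by omega)]
  cases hps : l.splitOn d with
  | nil => exact absurd hps (by simp [List.splitOn]; exact List.splitOnP_ne_nil _ l)
  | cons p ps => simp

theorem splitOn_of_not_mem {l : List Char} {d : Char} (h : d ∉ l) : l.splitOn d = [l] := by
  induction l with
  | nil => simp [List.splitOn]
  | cons c cs ih =>
    have hc : c ≠ d := fun hh => h (hh ▸ List.mem_cons_self)
    have := ih (fun hm => h (List.mem_cons_of_mem _ hm))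
    simp [List.splitOn, List.splitOnP_cons, hc] at *
    simp [this]

theorem splitOn_append {a : List Char} (b : List Char) {d : Char} (h : d ∉ a) :
    (a ++ d :: b).splitOn d = a :: b.splitOn d := by
  induction a with
  | nil => simp [List.splitOn, List.splitOnP_cons]
  | cons c cs ih =>
    have hc : c ≠ d := fun hh => h (hh ▸ List.mem_cons_self)
    have := ih (fun hm => h (List.mem_cons_of_mem _ hm))
    simp [List.splitOn, List.splitOnP_cons, hc] at *
    simp [this]

-- find s "." ≥ 0 decomposes s at its first dot
theorem find_dot_decomp {s : List Char} (h : ¬ PySem.Chars.find s ['.'] < 0) :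
    s = s.take (PySem.Chars.find s ['.']).toNat ++
        '.' :: s.drop ((PySem.Chars.find s ['.']).toNat + 1) ∧
      '.' ∉ s.take (PySem.Chars.find s ['.']).toNat := by
  have h0 : (0 : Int) ≤ PySem.Chars.find s ['.'] := by omega
  obtain ⟨hpre, hmin⟩ := PySem.Chars.find_spec (s := s) (sub := ['.']) h0
  set k := (PySem.Chars.find s ['.']).toNat with hk
  obtain ⟨t, ht⟩ := hpre
  have hdrop : s.drop k = '.' :: t := ht.symm
  constructor
  · have h1 : s.drop (k + 1) = t := by
      rw [← List.tail_drop, hdrop]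
      rfl
    rw [h1, ← hdrop, List.take_append_drop]
  · intro hmem
    obtain ⟨i, hi, hgi⟩ := List.mem_iff_getElem.mp hmem
    have hi' : i < k ∧ i < s.length := by
      simpa [List.length_take, Nat.lt_min] using hi
    have hil : i < s.length := hi'.2
    apply hmin i hi'.1
    have : s.drop i = s[i] :: s.drop (i + 1) := List.drop_eq_getElem_cons hil
    rw [this]
    have : s[i] = '.' := by
      have := List.getElem_take (xs := s) (i := i) (h := by simpa using hi)
      rw [← hgi]
      simp_all
    rw [this]
    exact ⟨s.drop (i + 1), rfl⟩

theorem find_dot_neg_iff (s : List Char) :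
    PySem.Chars.find s ['.'] < 0 ↔ '.' ∉ s := by
  constructor
  · intro h hm
    have := PySem.Chars.find_eq_neg_one_iff (s := s) (sub := ['.'])
    have hne := PySem.Chars.neg_one_le_find (s := s) (sub := ['.'])
    have : ¬ ['.'] <:+: s := this.mp (by omega)
    exact this ((List.singleton_infix_iff _ _).mpr hm)
  · intro hm
    have : PySem.Chars.find s ['.'] = -1 := by
      apply (PySem.Chars.find_eq_neg_one_iff (s := s) (sub := ['.'])).mpr
      intro hinf
      exact hm ((List.singleton_infix_iff _ _).mp hinf)
    omega

theorem sufs_eq_tails (s : List Char) :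
    (List.range (s.splitOn '.').length).map
        (fun i => ['.'].intercalate ((s.splitOn '.').drop i)) = pvSufs s := by
  induction s using pvSufs.induct with
  | case1 s idx h =>
    have hnm : '.' ∉ s := (find_dot_neg_iff s).mp h
    rw [pvSufs, splitOn_of_not_mem hnm, dif_pos h]
    simp [List.intercalate]
  | case2 s idx h ih =>
    obtain ⟨hdec, hnm⟩ := find_dot_decomp h
    rw [pvSufs, dif_neg h]
    have hsp : s.splitOn '.' = s.take idx.toNat :: (s.drop (idx.toNat + 1)).splitOn '.' := by
      conv_lhs => rw [hdec]
      exact splitOn_append _ hnm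
    rw [hsp]
    simp only [List.length_cons, List.range_succ_eq_map, List.map_cons, List.map_map]
    rw [← ih]
    congr 1
    have := List.intercalate_splitOn s '.'
    rw [hsp] at this
    simpa using this

theorem last_mem_sufs (s : List Char) (h : s.splitOn '.' ≠ []) :
    (s.splitOn '.').getLast h ∈ pvSufs s := by
  induction s using pvSufs.induct with
  | case1 s idx hlt =>
    have hnm : '.' ∉ s := (find_dot_neg_iff s).mp hlt
    rw [pvSufs, dif_pos hlt]
    have hsp := splitOn_of_not_mem hnm
    rw [List.getLast_congr h (List.cons_ne_nil _ _) hsp]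
    simp
  | case2 s idx hlt ih =>
    obtain ⟨hdec, hnm⟩ := find_dot_decomp hlt
    have hsp : s.splitOn '.' = s.take idx.toNat :: (s.drop (idx.toNat + 1)).splitOn '.' := by
      conv_lhs => rw [hdec]
      exact splitOn_append _ hnm
    have hne : (s.drop (idx.toNat + 1)).splitOn '.' ≠ [] := by
      simp [List.splitOn]; exact List.splitOnP_ne_nil _ _
    rw [pvSufs, dif_neg hlt]
    rw [List.getLast_congr h (List.cons_ne_nil _ _) hsp, List.getLast_cons hne]
    exact List.mem_cons_of_mem _ (ih hne)

-- once vv is in seen it stays there through the rest of the fold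
theorem seen_mono (l : List (List Char)) (acc : List (List Char) × PySem.Set (List Char))
    (v : List Char) (h : v ∈ acc.2) : v ∈ (l.foldl pvDedupStepA acc).2 := by
  induction l generalizing acc with
  | nil => exact h
  | cons x xs ih =>
    apply ih
    simp only [pvDedupStepA]
    split
    · exact h
    · exact (PySem.Set.mem_add _ _ _).mpr (Or.inl h)

theorem strip_mem_seen (l : List (List Char)) (acc : List (List Char) × PySem.Set (List Char))
    (x : List Char) (hx : x ∈ l) :
    PySem.Chars.strip x = [] ∨ PySem.Chars.strip x ∈ (l.foldl pvDedupStepA acc).2 := by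
  induction l generalizing acc with
  | nil => cases hx
  | cons y ys ih =>
    rcases List.mem_cons.mp hx with hxy | hxm
    · subst hxy
      by_cases hnil : PySem.Chars.strip x = []
      · exact Or.inl hnil
      · right
        rw [List.foldl_cons]
        apply seen_mono
        simp only [pvDedupStepA]
        split
        · next hcond =>
          rcases hcond with hc | hc
          · exact absurd hc hnil
          · exact (PySem.Set.contains_iff _ _).mp hc
        · exact (PySem.Set.mem_add _ _ _).mpr (Or.inr rfl)
    · exact ih _ hxm

theorem fold_noop (l : List (List Char)) (acc : List (List Char) × PySem.Set (List Char))
    (x : List Char) (hx : x ∈ l) :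
    (List.foldl pvDedupStepA acc (l ++ [x])).1 = (l.foldl pvDedupStepA acc).1 := by
  rw [List.foldl_append]
  rcases strip_mem_seen l acc x hx with hnil | hmem
  · simp [pvDedupStepA, hnil]
  · simp only [List.foldl_cons, List.foldl_nil, pvDedupStepA]
    rw [if_pos (Or.inr ((PySem.Set.contains_iff _ _).mpr hmem))]

theorem scan_eq_fold (s : List Char) (acc : List (List Char) × PySem.Set (List Char)) :
    pvAliasScan s acc = ((pvSufs s).foldl pvDedupStepA acc).1 := by
  induction s using pvSufs.induct generalizing acc with
  | case1 s idx h =>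
    rw [pvAliasScan, pvSufs, dif_pos h, dif_pos h]
    simp only [List.foldl_cons, List.foldl_nil]
    rfl
  | case2 s idx h ih =>
    rw [pvAliasScan, pvSufs, dif_neg h, dif_neg h]
    simp only [List.foldl_cons]
    rw [← ih]
    rfl

theorem pyGet_neg_one_getLast (xs : List (List Char)) (h : xs ≠ []) :
    (PySem.List.pyGet? xs (-1)).getD [] = xs.getLast h := by
  have hlen : 0 < xs.length := List.length_pos_iff.mpr h
  simp only [PySem.List.pyGet?, PySem.List.pyIdx?]
  have h1 : ¬ (0 : Int) ≤ -1 := by omega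
  have h2 : -(xs.length : Int) ≤ -1 := by omega
  rw [if_neg h1, if_pos h2]
  simp only [Option.bind_some]
  have : xs.length - (-(-1 : Int)).toNat = xs.length - 1 := by norm_num
  rw [this, List.getLast_eq_getElem]
  rw [List.getElem?_eq_getElem (by omega)]
  rfl

-- A's out list, for nonempty normalized s, is exactly pvSufs s ++ [last component]
theorem outA_eq (s : List Char) :
    (if PySem.Chars.isIn ['.'] s = true then
        (PySem.List.pyRange 1 ((PySem.Chars.splitOn s ['.']).length : Int) 1).foldl
          (fun o i => o ++ [PySem.Chars.join ['.']
            (PySem.List.slice (PySem.Chars.splitOn s ['.']) (some i) none)]) [s]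
      else [s]) ++ [(PySem.List.pyGet? (PySem.Chars.splitOn s ['.']) (-1)).getD []] =
    pvSufs s ++ [(s.splitOn '.').getLast (by
      simp [List.splitOn]; exact List.splitOnP_ne_nil _ _)] := by
  have hsne : s.splitOn '.' ≠ [] := by
    simp [List.splitOn]; exact List.splitOnP_ne_nil _ _
  rw [splitOn_single, pyGet_neg_one_getLast _ hsne]
  congr 1
  by_cases hin : PySem.Chars.isIn ['.'] s = true
  · rw [if_pos hin]
    have hfind : ¬ PySem.Chars.find s ['.'] < 0 := by
      rw [find_dot_neg_iff]
      have := (PySem.Chars.isIn_iff_infix (sub := ['.']) (s := s)).mp hin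
      simpa using (List.singleton_infix_iff '.' s).mp this
    rw [PySem.List.foldl_append_singleton_eq_map]
    -- turn the pyRange-over-slices into range-over-drops
    have hmap : (PySem.List.pyRange 1 ((s.splitOn '.').length : Int) 1).map
        (fun i => PySem.Chars.join ['.'] (PySem.List.slice (s.splitOn '.') (some i) none)) =
        (List.range ((s.splitOn '.').length - 1)).map
        (fun k => ['.'].intercalate ((s.splitOn '.').drop (k + 1))) := by
      rw [PySem.List.pyRange_one]
      rw [List.map_map]
      have hcast : (((s.splitOn '.').length : Int) - 1).toNat = (s.splitOn '.').length - 1 := by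
        omega
      rw [hcast]
      apply List.map_congr_left
      intro k hk
      simp only [Function.comp]
      rw [PySem.List.slice_from _ (show (0 : Int) ≤ 1 + (k : Int) from by omega)]
      have : ((1 : Int) + k).toNat = k + 1 := by omega
      rw [this]
      rfl
    rw [hmap, ← sufs_eq_tails s]
    obtain ⟨m, hm⟩ : ∃ m, (s.splitOn '.').length = m + 1 := by
      cases hsp : s.splitOn '.' with
      | nil => exact absurd hsp hsne
      | cons p ps => exact ⟨ps.length, by simp⟩
    rw [hm]
    simp only [Nat.add_sub_cancel, List.range_succ_eq_map, List.map_cons, List.map_map,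
      List.singleton_append]
    congr 1
    have := List.intercalate_splitOn s '.'
    simpa using this.symm
  · rw [if_neg hin]
    have hfind : PySem.Chars.find s ['.'] < 0 := by
      rw [find_dot_neg_iff]
      intro hm
      apply hin
      rw [PySem.Chars.isIn_iff_infix]
      exact (List.singleton_infix_iff '.' s).mpr hm
    rw [pvSufs, dif_pos hfind]

theorem charsA_eq_scan (s : List Char) :
    (((if PySem.Chars.isIn ['.'] s = true then
        (PySem.List.pyRange 1 ((PySem.Chars.splitOn s ['.']).length : Int) 1).foldl
          (fun o i => o ++ [PySem.Chars.join ['.']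
            (PySem.List.slice (PySem.Chars.splitOn s ['.']) (some i) none)]) [s]
      else [s]) ++ [(PySem.List.pyGet? (PySem.Chars.splitOn s ['.']) (-1)).getD []]).foldl
        pvDedupStepA ([], PySem.Set.empty)).1 = pvAliasScan s ([], PySem.Set.empty) := by
  rw [outA_eq s]
  rw [fold_noop _ _ _ (last_mem_sufs s _)]
  rw [scan_eq_fold]

-- ===== VERDICT (by name: the statement is the Claim_ definition above) =====
theorem pin_name_aliases_py_spec : Claim_equal_pin_name_aliases_py := by
  intro name _
  unfold Spec_pin_name_aliases_py pin_name_aliases_py pin_name_aliases_py_alt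
  unfold pinAliasesCharsA
  dsimp only
  by_cases h0 : PySem.Chars.strip name.toList = []
  · rw [h0]
    decide
  · rw [if_neg h0]
    set s := PySem.Chars.replace (PySem.Chars.replace (PySem.Chars.replace
        (PySem.Chars.strip name.toList) ['\\', '['] ['[']) ['\\', ']'] [']']) ['\\'] []
    by_cases hse : s = []
    · rw [hse]
      decide
    · rw [if_neg hse, charsA_eq_scan s]
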